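-- pv_equiv track=rewrite | github.com/machi-debug/jobs | m_scraper.py | infer_locations
-- ===== SOURCE A (Python) =====
-- from typing import List, Optional, Tuple
--
-- QC_LOCATIONS = [
--     ("st-marc", "St-Marc-des-Carrières"),
--     ("st marc", "St-Marc-des-Carrières"),
--     ("victoriaville", "Victoriaville"),
-- ]
--
-- def infer_locations(url: str, page_text: str) -> List[Tuple[str, str, str]]:
--     """
--     Returns a list of (city, state, country) tuples.
--
--     - English /jobs/ → always single location: Livermore, KY, US
--     - French /fr/emplois/ → detect ALL QC cities mentioned in the page text or URL.
--       If multiple QC cities are found, return one tuple per city so the caller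
--       can create a separate LinkedIn job posting for each location.
--       Falls back to Victoriaville, QC, CA if no city is detected.
--     """
--     is_french = "/fr/emplois/" in url or "/emplois/" in url
--     text_low = (page_text or "").lower()
--     url_low = url.lower()
--
--     if not is_french:
--         return [("Livermore", "KY", "US")]
--
--     # Check all known QC locations against both URL and page text
--     found: List[Tuple[str, str, str]] = []
--     seen_cities: set = set()
--
--     combined = url_low + " " + text_low
--
--     for keyword, city_name in QC_LOCATIONS:
--         if keyword in combined and city_name not in seen_cities:
--             found.append((city_name, "QC", "CA"))
--             seen_cities.add(city_name)
--
--     # Fallback: default to Victoriaville if nothing matched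
--     if not found:
--         found.append(("Victoriaville", "QC", "CA"))
--
--     return found
-- ===== SOURCE B (Python) =====
-- from typing import List, Tuple
--
-- # one entry per distinct city, aliases in QC_LOCATIONS' order
-- CITY_ALIASES = [
--     ("St-Marc-des-Carrières", ["st-marc", "st marc"]),
--     ("Victoriaville", ["victoriaville"]),
-- ]
--
-- def infer_locations(url: str, page_text: str) -> List[Tuple[str, str, str]]:
--     if "/emplois/" not in url:
--         return [("Livermore", "KY", "US")]
--     combined = url.lower() + " " + (page_text or "").lower()
--     found = [(city, "QC", "CA")
--              for city, aliases in CITY_ALIASES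
--              if any(a in combined for a in aliases)]
--     return found or [("Victoriaville", "QC", "CA")]
-- ===== Notes on version B (the rewrite author's own statement) =====
-- stated objective: simpler
-- what changed: Replaces the keyword loop with a seen-set by an ordered city->aliases mapping filtered with any(), removing deduplication state, and folds the redundant '/fr/emplois/' check into the '/emplois/' substring test.
import Mathlib
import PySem

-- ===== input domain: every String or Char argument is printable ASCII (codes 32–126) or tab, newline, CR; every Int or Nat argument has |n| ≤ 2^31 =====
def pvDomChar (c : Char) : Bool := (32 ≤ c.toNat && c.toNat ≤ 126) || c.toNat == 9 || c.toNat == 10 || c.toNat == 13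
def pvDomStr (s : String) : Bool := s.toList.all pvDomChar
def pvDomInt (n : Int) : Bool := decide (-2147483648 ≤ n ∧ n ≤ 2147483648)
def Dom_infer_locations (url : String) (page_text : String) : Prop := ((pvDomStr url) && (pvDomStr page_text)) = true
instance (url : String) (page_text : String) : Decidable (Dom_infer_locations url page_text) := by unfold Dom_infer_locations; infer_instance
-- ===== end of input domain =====

-- B: ordered city->aliases mapping filtered with any() instead of a keyword loop with a seen-set;
-- the redundant "/fr/emplois/" check is folded into the "/emplois/" substring test. Objective: simpler.
-- ===== PORT A =====
def QC_LOCATIONS : List (String × String) :=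
  [("st-marc", "St-Marc-des-Carrières"), ("st marc", "St-Marc-des-Carrières"),
   ("victoriaville", "Victoriaville")]

def infer_locations (url : String) (page_text : String) : List (String × String × String) :=
  let is_french := PySem.Str.isIn "/fr/emplois/" url || PySem.Str.isIn "/emplois/" url
  let text_low := PySem.Str.lower page_text
  let url_low := PySem.Str.lower url
  if !is_french then [("Livermore", "KY", "US")]
  else
    let combined := url_low ++ " " ++ text_low
    let st := QC_LOCATIONS.foldl
      (fun (acc : List (String × String × String) × PySem.Set String) kv =>
        if PySem.Str.isIn kv.1 combined && !(PySem.Set.contains acc.2 kv.2) then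
          (acc.1 ++ [(kv.2, "QC", "CA")], PySem.Set.add acc.2 kv.2)
        else acc)
      ([], PySem.Set.empty)
    let found := if st.1.isEmpty then st.1 ++ [("Victoriaville", "QC", "CA")] else st.1
    found

-- ===== PORT B =====
def CITY_ALIASES : List (String × List String) :=
  [("St-Marc-des-Carrières", ["st-marc", "st marc"]), ("Victoriaville", ["victoriaville"])]

def infer_locations_alt (url : String) (page_text : String) : List (String × String × String) :=
  if !(PySem.Str.isIn "/emplois/" url) then [("Livermore", "KY", "US")]
  else
    let combined := PySem.Str.lower url ++ " " ++ PySem.Str.lower page_text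
    let found := (CITY_ALIASES.filter
        (fun ca => ca.2.any (fun a => PySem.Str.isIn a combined))).map
      (fun ca => (ca.1, "QC", "CA"))
    if found.isEmpty then [("Victoriaville", "QC", "CA")] else found

-- ===== PRECONDITION & SPEC =====
def Spec_infer_locations (url : String) (page_text : String) (out : List (String × String × String)) : Prop := out = infer_locations_alt url page_text
instance (url : String) (page_text : String) (out : List (String × String × String)) : Decidable (Spec_infer_locations url page_text out) := by unfold Spec_infer_locations; infer_instance

-- ===== CLAIM (what is proved, stated in full; the proofs are below) =====
def Claim_equal_infer_locations : Prop := ∀ (url : String) (page_text : String), Dom_infer_locations url page_text → Spec_infer_locations url page_text (infer_locations url page_text)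

-- ===== LEMMAS AND PROOFS =====

-- ===== VERDICT (by name: the statement is the Claim_ definition above) =====
-- "/fr/emplois/" contains "/emplois/", so A's disjunctive guard equals B's single test
lemma fr_guard (url : String) :
    (PySem.Str.isIn "/fr/emplois/" url || PySem.Str.isIn "/emplois/" url)
      = PySem.Str.isIn "/emplois/" url := by
  cases h : PySem.Str.isIn "/fr/emplois/" url
  · simp
  · rw [PySem.Str.isIn_iff_infix] at h
    simp only [Bool.true_or]
    rw [Eq.comm, PySem.Str.isIn_iff_infix]
    exact List.IsInfix.trans (by decide) h

theorem infer_locations_spec : Claim_equal_infer_locations := by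
  intro url page_text _
  unfold Spec_infer_locations infer_locations infer_locations_alt QC_LOCATIONS CITY_ALIASES
  rw [fr_guard]
  cases hg : PySem.Str.isIn "/emplois/" url
  · simp
  · simp only [Bool.not_true, Bool.false_eq_true, if_false]
    set c := PySem.Str.lower url ++ " " ++ PySem.Str.lower page_text with hc
    cases h1 : PySem.Str.isIn "st-marc" c <;>
      cases h2 : PySem.Str.isIn "st marc" c <;>
        cases h3 : PySem.Str.isIn "victoriaville" c <;>
          (try simp at h1 h2 h3) <;>
            simp [h1, h2, h3, PySem.Set.contains, PySem.Set.add, PySem.Set.empty]
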